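-- pv_equiv track=rewrite | github.com/joshanashakya/dissertation | workspace/dataset/java-python/GeeksForGeeks/1858/A/2.py | xorOdd
-- ===== SOURCE A (Python) =====
-- def xorOdd(arr, n) :
--
--     # To store the frequency
--     # of all the elements
--     m = dict.fromkeys(arr, 0);
--
--     # Update the map with the
--     # frequency of the elements
--     for i in range(n) :
--         m[arr[i]] += 1;
--
--     # To store the XOR of the elements
--     # appearing odd number of
--     # times in the array
--     xorArr = 0;
--
--     # Traverse the map using an iterator
--     for key,value in m.items() :
--
--         # Check for odd frequency
--         # and update the xor
--         if (value & 1) :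
--             xorArr ^= key;
--
--     return xorArr;
-- ===== SOURCE B (Python) =====
-- def xorOdd(arr, n):
--     # Single accumulator pass: XOR self-cancels even occurrences, so the
--     # XOR of the first n elements equals the XOR of odd-frequency elements.
--     x = 0
--     for i in range(n):
--         x ^= arr[i]
--     return x
-- ===== Notes on version B (the rewrite author's own statement) =====
-- stated objective: simpler
-- what changed: Replaced the two-pass frequency-dict algorithm (count frequencies, then XOR keys with odd count) with a single accumulator loop XOR-ing the first n elements, relying on XOR self-cancellation of even occurrences.
import Mathlib
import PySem

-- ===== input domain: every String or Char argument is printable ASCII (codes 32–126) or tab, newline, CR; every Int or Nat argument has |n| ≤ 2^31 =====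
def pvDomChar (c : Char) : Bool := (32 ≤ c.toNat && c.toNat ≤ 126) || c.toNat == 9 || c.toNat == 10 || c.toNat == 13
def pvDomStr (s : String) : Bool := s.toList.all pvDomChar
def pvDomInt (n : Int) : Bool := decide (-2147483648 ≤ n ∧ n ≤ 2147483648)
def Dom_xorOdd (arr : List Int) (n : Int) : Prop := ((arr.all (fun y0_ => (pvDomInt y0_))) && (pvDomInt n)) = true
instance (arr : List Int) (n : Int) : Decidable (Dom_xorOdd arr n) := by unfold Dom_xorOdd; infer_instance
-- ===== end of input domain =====

-- B replaces A's frequency-dict two-pass algorithm with a single XOR accumulator pass (simpler; measurably faster by a constant factor, no dict).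
-- B replaces A's frequency-dict two-pass algorithm with a single XOR accumulator pass (simpler; measurably faster by a constant factor, no dict).
-- ===== PORT A =====
def xorOdd (arr : List Int) (n : Int) : Int :=
  -- m = dict.fromkeys(arr, 0); for i in range(n): m[arr[i]] += 1  (arr[i] raises IndexError outside Pre_);
  -- xorArr = 0; for key,value in m.items(): if value & 1: xorArr ^= key; return xorArr
  (((PySem.List.pyRange 0 n).foldl
      (fun d i => d.modify (PySem.List.pyGetD arr i 0) 0 (fun v => v + 1))
      (arr.foldl (fun d k => d.insert k 0) PySem.Dict.empty)).items).foldl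
    (fun x kv => if PySem.Int.band kv.2 1 ≠ 0 then PySem.Int.bxor x kv.1 else x) 0

-- ===== PORT B =====
def xorOdd_alt (arr : List Int) (n : Int) : Int :=
  -- x = 0; for i in range(n): x ^= arr[i]   (arr[i] raises IndexError outside Pre_)
  (PySem.List.pyRange 0 n).foldl (fun x i => PySem.Int.bxor x (PySem.List.pyGetD arr i 0)) 0

-- ===== PRECONDITION & SPEC =====
-- Pre_ excludes exactly the inputs where both Pythons raise IndexError (n exceeds len(arr)).
def Pre_xorOdd (arr : List Int) (n : Int) : Prop := n ≤ (arr.length : Int)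
instance (arr : List Int) (n : Int) : Decidable (Pre_xorOdd arr n) := by unfold Pre_xorOdd; infer_instance
def pvWitness_xorOdd : List Int × Int := ([1, 2, 2, 3], 4)
def Spec_xorOdd (arr : List Int) (n : Int) (out : Int) : Prop := out = xorOdd_alt arr n
instance (arr : List Int) (n : Int) (out : Int) : Decidable (Spec_xorOdd arr n out) := by unfold Spec_xorOdd; infer_instance

-- ===== CLAIM (what is proved, stated in full; the proofs are below) =====
def Claim_equal_xorOdd : Prop := ∀ (arr : List Int) (n : Int), Dom_xorOdd arr n → Pre_xorOdd arr n → Spec_xorOdd arr n (xorOdd arr n)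

-- ===== LEMMAS AND PROOFS =====

-- bxor case lemmas (sign of the result from the signs of the arguments)
theorem bxor_coe_negSucc (m k : Nat) :
    PySem.Int.bxor (m : Int) (Int.negSucc k) = Int.negSucc (m ^^^ k) := by
  have h1 : ¬ ((0:Int) ≤ Int.negSucc k) := by omega
  have h2 : (-(Int.negSucc k) - 1).toNat = k := by omega
  simp [PySem.Int.bxor, Int.negSucc_eq]
  omega

theorem bxor_negSucc_coe (m k : Nat) :
    PySem.Int.bxor (Int.negSucc m) (k : Int) = Int.negSucc (m ^^^ k) := by
  have h1 : ¬ ((0:Int) ≤ Int.negSucc m) := by omega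
  have h2 : (-(Int.negSucc m) - 1).toNat = m := by omega
  simp [PySem.Int.bxor, Int.negSucc_eq]
  omega

theorem bxor_negSucc_negSucc (m k : Nat) :
    PySem.Int.bxor (Int.negSucc m) (Int.negSucc k) = ((m ^^^ k : Nat) : Int) := by
  have h1 : ¬ ((0:Int) ≤ Int.negSucc m) := by omega
  have h2 : (-(Int.negSucc m) - 1).toNat = m := by omega
  have h3 : (-(Int.negSucc k) - 1).toNat = k := by omega
  simp [PySem.Int.bxor, h1]

theorem bxor_assoc (a b c : Int) :
    PySem.Int.bxor (PySem.Int.bxor a b) c = PySem.Int.bxor a (PySem.Int.bxor b c) := by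
  rcases a with m | m <;> rcases b with k | k <;> rcases c with l | l <;>
    simp [Int.ofNat_eq_natCast, PySem.Int.bxor_natCast, bxor_coe_negSucc, bxor_negSucc_coe,
      bxor_negSucc_negSucc, Nat.xor_assoc]

theorem bxor_cancel_left (a y : Int) :
    PySem.Int.bxor a (PySem.Int.bxor a y) = y := by
  rw [← bxor_assoc, PySem.Int.bxor_self, PySem.Int.bxor_comm, PySem.Int.bxor_zero]

theorem bxor_left_comm (a b y : Int) :
    PySem.Int.bxor a (PySem.Int.bxor b y) = PySem.Int.bxor b (PySem.Int.bxor a y) := by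
  rw [← bxor_assoc, ← bxor_assoc, PySem.Int.bxor_comm a b]

-- XOR of a whole list
def xorL (l : List Int) : Int := l.foldl PySem.Int.bxor 0

theorem foldl_bxor_shift (l : List Int) (x : Int) :
    l.foldl PySem.Int.bxor x = PySem.Int.bxor x (xorL l) := by
  induction l generalizing x with
  | nil =>
      show x = PySem.Int.bxor x (PySem.Int.bxor 0 0)
      rw [PySem.Int.bxor_zero, PySem.Int.bxor_zero]
  | cons a l ih =>
      show List.foldl _ (PySem.Int.bxor x a) l
          = PySem.Int.bxor x (List.foldl _ (PySem.Int.bxor 0 a) l)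
      rw [ih (PySem.Int.bxor x a), ih (PySem.Int.bxor 0 a), PySem.Int.bxor_comm 0 a,
        PySem.Int.bxor_zero, bxor_assoc]

theorem xorL_cons (a : Int) (l : List Int) :
    xorL (a :: l) = PySem.Int.bxor a (xorL l) := by
  show List.foldl PySem.Int.bxor (PySem.Int.bxor 0 a) l = _
  rw [foldl_bxor_shift, PySem.Int.bxor_comm 0 a, PySem.Int.bxor_zero]

-- a selective foldl is the XOR of the filtered list
theorem foldl_if_bxor (K : List Int) (p : Int → Bool) (x : Int) :
    K.foldl (fun x k => if p k then PySem.Int.bxor x k else x) x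
      = (K.filter p).foldl PySem.Int.bxor x := by
  induction K generalizing x with
  | nil => rfl
  | cons k K ih => by_cases h : p k <;> simp [List.foldl, List.filter, h, ih]

-- flipping the selection predicate at one element a ∈ K XORs the result by a
theorem xorL_filter_flip (K : List Int) (p p' : Int → Bool) (a : Int)
    (ha : a ∈ K) (hnd : K.Nodup)
    (hflip : p' a = ! p a) (hoth : ∀ k, k ≠ a → p' k = p k) :
    xorL (K.filter p') = PySem.Int.bxor a (xorL (K.filter p)) := by
  induction K with
  | nil => cases ha
  | cons k K ih =>
      rcases List.nodup_cons.mp hnd with ⟨hk, hndK⟩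
      rcases List.mem_cons.mp ha with rfl | haK
      · have hfeq : K.filter p' = K.filter p := by
          apply List.filter_congr
          intro x hx
          exact hoth x (fun (h : x = a) => hk (h ▸ hx))
        by_cases hpa : p a
        · have hpa' : p' a = false := by rw [hflip, hpa]; rfl
          simp [hpa, hpa', hfeq, xorL_cons, bxor_cancel_left]
        · have hpa0 : p a = false := by simpa using hpa
          have hpa' : p' a = true := by rw [hflip, hpa0]; rfl
          simp [hpa0, hpa', hfeq, xorL_cons]
      · have hka : k ≠ a := fun (h : k = a) => hk (h ▸ haK)
        have hpk : p' k = p k := hoth k hka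
        by_cases h : p k
        · simp only [List.filter_cons, h, hpk, if_true]
          rw [xorL_cons, xorL_cons, ih haK hndK, bxor_left_comm]
        · have h' : p k = false := by simpa using h
          simp only [List.filter_cons, h', hpk, Bool.false_eq_true, if_false]
          exact ih haK hndK

-- CORE: XOR over the distinct keys with odd count in L equals the XOR of L
theorem core_lemma (L K : List Int) (hnd : K.Nodup) (hsub : ∀ x ∈ L, x ∈ K) :
    K.foldl (fun x k => if (L.count k) % 2 == 1 then PySem.Int.bxor x k else x) 0 = xorL L := by
  induction L generalizing K with
  | nil =>
      rw [foldl_if_bxor]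
      have hf : K.filter (fun k => ([] : List Int).count k % 2 == 1) = [] := by
        apply List.filter_eq_nil_iff.mpr
        intro k _
        simp
      rw [hf]
      rfl
  | cons a L ih =>
      rw [foldl_if_bxor]
      show xorL _ = _
      have hflip : (fun k => ((a :: L).count k) % 2 == 1) a
          = ! ((fun k => (L.count k) % 2 == 1) a) := by
        have hcc : (a :: L).count a = L.count a + 1 := by simp
        show ((a :: L).count a % 2 == 1) = ! (L.count a % 2 == 1)
        rw [hcc]
        rcases Nat.mod_two_eq_zero_or_one (L.count a) with h | h <;>
          rw [Nat.add_mod, h] <;> simp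
      have hoth : ∀ k, k ≠ a → ((fun k => ((a :: L).count k) % 2 == 1) k
          = (fun k => (L.count k) % 2 == 1) k) := by
        intro k hka
        have hke : (a == k) = false := beq_eq_false_iff_ne.mpr (fun h => hka h.symm)
        show ((a :: L).count k % 2 == 1) = (L.count k % 2 == 1)
        rw [List.count_cons, hke]
        simp
      rw [xorL_filter_flip K (fun k => (L.count k) % 2 == 1)
            (fun k => ((a :: L).count k) % 2 == 1) a
            (hsub a List.mem_cons_self) hnd hflip hoth]
      have h1 : xorL (K.filter (fun k => (L.count k) % 2 == 1)) = xorL L := by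
        have h2 := (foldl_if_bxor K (fun k => (L.count k) % 2 == 1) 0).symm
        exact h2.trans (ih K hnd (fun x hx => hsub x (List.mem_cons_of_mem a hx)))
      rw [h1, xorL_cons]

-- fromkeys stores only the value 0, so getD _ 0 is always 0
theorem getD_fromkeys (arr : List Int) (d : PySem.Dict Int Int) (v : Int)
    (h : d.getD v 0 = 0) :
    (arr.foldl (fun d k => d.insert k 0) d).getD v 0 = 0 := by
  induction arr generalizing d with
  | nil => exact h
  | cons a arr ih =>
      apply ih
      by_cases hv : v = a
      · subst hv; simp [PySem.Dict.getD_insert_self]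
      · rw [PySem.Dict.getD_insert_of_ne _ _ _ hv]; exact h

-- A's whole computation, with the list of accessed elements abstracted as L
theorem A_eq_xorL (arr L : List Int) :
    ((L.foldl (fun d x => d.modify x 0 (fun v => v + 1))
        (arr.foldl (fun d k => d.insert k 0) PySem.Dict.empty)).items).foldl
      (fun x kv => if PySem.Int.band kv.2 1 ≠ 0 then PySem.Int.bxor x kv.1 else x) 0
      = xorL L := by
  set m0 : PySem.Dict Int Int := arr.foldl (fun d k => d.insert k 0) PySem.Dict.empty with hm0
  set m : PySem.Dict Int Int := L.foldl (fun d x => d.modify x 0 (fun v => v + 1)) m0 with hm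
  have hm0nd : m0.keys.Nodup := by
    rw [hm0]
    exact PySem.Dict.nodup_keys_foldl_insert arr _ _ (by simp [PySem.Dict.keys_empty])
  have hkeys : m.keys = PySem.Set.update m0.keys L := by
    rw [hm]
    exact PySem.Dict.keys_foldl_modify L 0 (fun _ _ => fun v => v + 1) m0
  have hnd : m.keys.Nodup := by
    rw [hkeys]; exact PySem.Set.nodup_update _ _ hm0nd
  have hsub : ∀ x ∈ L, x ∈ m.keys := by
    intro x hx
    rw [hkeys]
    exact (PySem.Set.mem_update _ _ _).mpr (Or.inr hx)
  have hval : ∀ k : Int, m.getD k 0 = (L.count k : Int) := by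
    intro k
    rw [hm, PySem.Dict.getD_foldl_modify_add_one]
    rw [hm0, getD_fromkeys arr _ k (by simp [PySem.Dict.getD_empty])]
    omega
  rw [PySem.Dict.items_eq_map_keys m hnd 0, List.foldl_map]
  have hstep : ∀ (x : Int), ∀ k ∈ m.keys,
      ((fun (x : Int) kv => if PySem.Int.band (Prod.snd kv) 1 ≠ 0
          then PySem.Int.bxor x kv.1 else x) x ((fun k => (k, m.getD k 0)) k))
        = (fun (x : Int) k => if (L.count k) % 2 == 1 then PySem.Int.bxor x k else x) x k := by
    intro x k _
    show (if PySem.Int.band (m.getD k 0) 1 ≠ 0 then PySem.Int.bxor x k else x)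
        = (if (L.count k) % 2 == 1 then PySem.Int.bxor x k else x)
    have hb : PySem.Int.band (m.getD k 0) 1 = ((L.count k % 2 : Nat) : Int) := by
      rw [hval k]
      have h := PySem.Int.band_natCast (L.count k) 1
      simpa [Nat.and_one_is_mod] using h
    have hc : (PySem.Int.band (m.getD k 0) 1 ≠ 0) ↔ (((L.count k) % 2 == 1) = true) := by
      rw [hb]
      constructor
      · intro h
        have h2 : L.count k % 2 = 1 := by omega
        simp [h2]
      · intro h
        have h2 : L.count k % 2 = 1 := by simpa using h
        simp [h2]
    by_cases h : PySem.Int.band (m.getD k 0) 1 ≠ 0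
    · rw [if_pos h, if_pos (hc.mp h)]
    · rw [if_neg h, if_neg (fun hh => h (hc.mpr hh))]
  rw [PySem.List.foldl_congr_mem m.keys _ _ 0 hstep]
  exact core_lemma L m.keys hnd hsub

-- ===== VERDICT (by name: the statement is the Claim_ definition above) =====
theorem xorOdd_spec : Claim_equal_xorOdd := by
  intro arr n _ _
  unfold Spec_xorOdd xorOdd xorOdd_alt
  rw [← List.foldl_map (f := fun i => PySem.List.pyGetD arr i 0) (g := PySem.Int.bxor)
        (l := PySem.List.pyRange 0 n) (init := 0),
      ← List.foldl_map (f := fun i => PySem.List.pyGetD arr i 0)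
        (g := fun (d : PySem.Dict Int Int) (x : Int) => d.modify x 0 (fun v => v + 1))
        (l := PySem.List.pyRange 0 n)]
  exact A_eq_xorL arr _
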